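-- pv_equiv track=rewrite | github.com/Zeydel/Advent-Of-Code | AoC15/Day01/Day01.py | findFinalFloor
-- ===== SOURCE A (Python) =====
-- def findFinalFloor(directions):
--     # Santa is initially on floor 0
--     floor = 0
--     # Change floor depending on instruction
--     for d in directions:
--         if d == '(':
--             floor += 1
--         else:
--             floor -= 1
--     # Return the final floor
--     return floor
-- ===== SOURCE B (Python) =====
-- def findFinalFloor(directions):
--     # Divide and conquer: floor change of a string = sum of floor changes of its halves.
--     def go(s):
--         n = len(s)
--         if n == 0:
--             return 0
--         if n == 1:
--             return 1 if s == '(' else -1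
--         m = n // 2
--         return go(s[:m]) + go(s[m:])
--     return go(directions)
-- ===== Notes on version B (the rewrite author's own statement) =====
-- stated objective: alternative
-- what changed: Replaces A's linear accumulating branch loop with a divide-and-conquer recursion that splits the string in half and adds the net floor change of each half (correct because the per-character contributions sum associatively).
import Mathlib
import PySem

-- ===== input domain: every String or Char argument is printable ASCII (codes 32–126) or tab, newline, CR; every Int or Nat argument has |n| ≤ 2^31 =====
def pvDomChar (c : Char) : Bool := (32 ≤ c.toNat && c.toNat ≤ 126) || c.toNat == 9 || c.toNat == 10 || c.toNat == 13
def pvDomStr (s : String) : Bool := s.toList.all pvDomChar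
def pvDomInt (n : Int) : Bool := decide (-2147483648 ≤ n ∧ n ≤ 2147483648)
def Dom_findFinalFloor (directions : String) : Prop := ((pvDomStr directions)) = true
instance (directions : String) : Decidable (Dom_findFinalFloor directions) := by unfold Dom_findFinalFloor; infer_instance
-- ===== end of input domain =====

-- B replaces A's linear accumulating branch loop with a divide-and-conquer
-- recursion over string halves (alternative decomposition, same O(n) cost).

-- ===== PORT A =====
def findFinalFloor (directions : String) : Int :=
  directions.toList.foldl (fun floor d => if d == '(' then floor + 1 else floor - 1) 0

-- ===== PORT B =====
-- helper 'go' of Source B: split in half, recurse, add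
def ffGo (l : List Char) : Int :=
  if h0 : l.length = 0 then 0
  else if h1 : l.length = 1 then (if l = ['('] then 1 else -1)
  else
    have h2 : 2 ≤ l.length := by omega
    have hm : 1 ≤ l.length / 2 := Nat.one_le_div_iff (by omega) |>.mpr (by omega)
    ffGo (l.take (l.length / 2)) + ffGo (l.drop (l.length / 2))
termination_by l.length
decreasing_by
  · simp only [List.length_take]; omega
  · simp only [List.length_drop]; omega

def findFinalFloor_alt (directions : String) : Int :=
  ffGo directions.toList

-- ===== PRECONDITION & SPEC =====
def Spec_findFinalFloor (directions : String) (out : Int) : Prop := out = findFinalFloor_alt directions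
instance (directions : String) (out : Int) : Decidable (Spec_findFinalFloor directions out) := by unfold Spec_findFinalFloor; infer_instance

-- ===== CLAIM (what is proved, stated in full; the proofs are below) =====
def Claim_equal_findFinalFloor : Prop := ∀ (directions : String), Dom_findFinalFloor directions → Spec_findFinalFloor directions (findFinalFloor directions)

-- ===== LEMMAS AND PROOFS =====

def ffVal (c : Char) : Int := if c == '(' then 1 else -1

theorem foldl_eq_sum (l : List Char) (a : Int) :
    l.foldl (fun floor d => if d == '(' then floor + 1 else floor - 1) a
      = a + (l.map ffVal).sum := by
  induction l generalizing a with
  | nil => simp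
  | cons x t ih =>
    simp only [List.foldl_cons, ih, List.map_cons, List.sum_cons, ffVal]
    by_cases hx : x = '('
    · simp [hx]; ring
    · simp [hx]; ring

theorem ffGo_eq_sum (l : List Char) : ffGo l = (l.map ffVal).sum := by
  induction hn : l.length using Nat.strong_induction_on generalizing l with
  | _ n ih =>
    unfold ffGo
    subst hn
    by_cases h0 : l.length = 0
    · have : l = [] := List.eq_nil_of_length_eq_zero h0
      simp [this]
    · by_cases h1 : l.length = 1
      · obtain ⟨c, hc⟩ := List.length_eq_one_iff.mp h1
        subst hc
        simp only [h1, List.map_cons, List.map_nil,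
          List.sum_cons, List.sum_nil, ffVal]
        by_cases hcp : c = '('
        · simp [hcp]
        · simp [hcp]
      · rw [dif_neg h0, dif_neg h1]
        have hlen2 : 2 ≤ l.length := by omega
        have hm1 : 1 ≤ l.length / 2 := Nat.one_le_div_iff (by omega) |>.mpr (by omega)
        rw [ih _ (by simp [List.length_take]; omega) _ rfl,
            ih _ (by simp [List.length_drop]; omega) _ rfl]
        rw [← List.sum_append, ← List.map_append, List.take_append_drop]

-- ===== VERDICT (by name: the statement is the Claim_ definition above) =====
theorem findFinalFloor_spec : Claim_equal_findFinalFloor := by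
  intro directions _
  unfold Spec_findFinalFloor findFinalFloor findFinalFloor_alt
  rw [foldl_eq_sum, ffGo_eq_sum]
  simp
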